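-- pv_equiv track=rewrite | github.com/fichtlandsachs/assist2 | backend/app/ai/validator.py | _has_citation
-- ===== SOURCE A (Python) =====
-- def _has_citation(text: str) -> bool:
--     """Check whether the answer contains at least one recognizable source reference."""
--     indicators = [
--         "http",
--         "confluence",
--         "jira",
--         "ticket",
--         "[confluence]",
--         "[jira]",
--         "[dokument]",
--         "[karl story]",
--         "quelle:",
--         "stand:",
--     ]
--     lower = text.lower()
--     return any(ind in lower for ind in indicators)
-- ===== SOURCE B (Python) =====
-- import re
--
-- _CITATION_RE = re.compile(
--     "|".join(
--         re.escape(indicator)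
--         for indicator in (
--             "http",
--             "confluence",
--             "jira",
--             "ticket",
--             "[confluence]",
--             "[jira]",
--             "[dokument]",
--             "[karl story]",
--             "quelle:",
--             "stand:",
--         )
--     )
-- )
--
--
-- def _has_citation(text: str) -> bool:
--     """Check whether the answer contains at least one recognizable source reference."""
--     return _CITATION_RE.search(text.lower()) is not None
-- ===== Notes on version B (the rewrite author's own statement) =====
-- stated objective: idiomatic
-- what changed: Replaces ten independent substring-containment scans by one compiled regex (an alternation of the re.escape'd indicators) whose single automaton-driven search pass over the lowered text decides the question.
import Mathlib
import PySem

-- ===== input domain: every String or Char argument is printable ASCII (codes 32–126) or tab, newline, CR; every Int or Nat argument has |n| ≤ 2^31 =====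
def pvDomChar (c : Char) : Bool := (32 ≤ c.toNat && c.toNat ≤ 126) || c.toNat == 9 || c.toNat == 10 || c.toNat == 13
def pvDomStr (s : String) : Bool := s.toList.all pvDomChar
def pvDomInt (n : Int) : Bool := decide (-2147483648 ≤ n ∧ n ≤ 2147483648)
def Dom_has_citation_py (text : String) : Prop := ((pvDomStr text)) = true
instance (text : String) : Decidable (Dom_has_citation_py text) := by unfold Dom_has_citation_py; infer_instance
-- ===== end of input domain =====

-- B replaces ten independent substring scans by one compiled-regex search (an alternation of the
-- escaped indicators) over the lowered text; same return value, no speed claim.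

-- ===== PORT A =====
def pvIndicatorsA : List String :=
  ["http", "confluence", "jira", "ticket", "[confluence]", "[jira]",
   "[dokument]", "[karl story]", "quelle:", "stand:"]

def has_citation_py (text : String) : Bool :=
  let lower := PySem.Str.lower text
  pvIndicatorsA.any (fun ind => PySem.Str.isIn ind lower)

-- ===== PORT B =====
-- the alternatives of the compiled regex (re.escape leaves the literal text unchanged)
def pvAlternatives : List (List Char) :=
  ["http".toList, "confluence".toList, "jira".toList, "ticket".toList,
   "[confluence]".toList, "[jira]".toList, "[dokument]".toList,
   "[karl story]".toList, "quelle:".toList, "stand:".toList]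

-- hand port of _CITATION_RE.search (PySem has no regex): for a regex that is an alternation of
-- escaped literals, the engine tries, at each position left to right, each alternative in order;
-- search succeeds iff some alternative is a prefix of some suffix — exact for this pattern.
def pvReSearch (cs : List Char) : Bool :=
  pvAlternatives.any (fun a => a.isPrefixOf cs) ||
    match cs with
    | [] => false
    | _ :: rest => pvReSearch rest

def has_citation_py_alt (text : String) : Bool :=
  pvReSearch (PySem.Str.lower text).toList

-- ===== PRECONDITION & SPEC =====
def Spec_has_citation_py (text : String) (out : Bool) : Prop := out = has_citation_py_alt text
instance (text : String) (out : Bool) : Decidable (Spec_has_citation_py text out) := by unfold Spec_has_citation_py; infer_instance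

-- ===== CLAIM (what is proved, stated in full; the proofs are below) =====
def Claim_equal_has_citation_py : Prop := ∀ (text : String), Dom_has_citation_py text → Spec_has_citation_py text (has_citation_py text)

-- ===== LEMMAS AND PROOFS =====

-- B's search finds exactly the infix occurrences of one of the alternatives
theorem pvReSearch_iff (cs : List Char) :
    pvReSearch cs = true ↔ ∃ a ∈ pvAlternatives, a <:+: cs := by
  induction cs with
  | nil =>
    refine iff_of_false (by decide) ?_
    rintro ⟨a, ha, hinf⟩
    have : a = [] := List.eq_nil_of_infix_nil hinf
    subst this
    simp [pvAlternatives] at ha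
  | cons c rest ih =>
    have hstep : pvReSearch (c :: rest)
        = (pvAlternatives.any (fun a => a.isPrefixOf (c :: rest)) || pvReSearch rest) := rfl
    rw [hstep, Bool.or_eq_true, ih, List.any_eq_true]
    constructor
    · rintro (⟨a, ha, hp⟩ | ⟨a, ha, hinf⟩)
      · exact ⟨a, ha, (List.isPrefixOf_iff_prefix.mp hp).isInfix⟩
      · exact ⟨a, ha, List.infix_cons_iff.mpr (Or.inr hinf)⟩
    · rintro ⟨a, ha, hinf⟩
      rcases List.infix_cons_iff.mp hinf with hp | hinf'
      · exact Or.inl ⟨a, ha, List.isPrefixOf_iff_prefix.mpr hp⟩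
      · exact Or.inr ⟨a, ha, hinf'⟩

-- A's indicator strings occur in a character list iff B's regex alternatives do
theorem pvInds_iff (cs : List Char) :
    (∃ s ∈ pvIndicatorsA, s.toList <:+: cs) ↔ ∃ a ∈ pvAlternatives, a <:+: cs := by
  constructor
  · rintro ⟨s, hs, hinf⟩
    refine ⟨s.toList, ?_, hinf⟩
    simp only [pvIndicatorsA, List.mem_cons, List.not_mem_nil, or_false] at hs
    rcases hs with rfl | rfl | rfl | rfl | rfl | rfl | rfl | rfl | rfl | rfl <;>
      simp [pvAlternatives]
  · rintro ⟨a, ha, hinf⟩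
    simp only [pvAlternatives, List.mem_cons, List.not_mem_nil, or_false] at ha
    rcases ha with rfl | rfl | rfl | rfl | rfl | rfl | rfl | rfl | rfl | rfl
    · exact ⟨"http", by simp [pvIndicatorsA], hinf⟩
    · exact ⟨"confluence", by simp [pvIndicatorsA], hinf⟩
    · exact ⟨"jira", by simp [pvIndicatorsA], hinf⟩
    · exact ⟨"ticket", by simp [pvIndicatorsA], hinf⟩
    · exact ⟨"[confluence]", by simp [pvIndicatorsA], hinf⟩
    · exact ⟨"[jira]", by simp [pvIndicatorsA], hinf⟩
    · exact ⟨"[dokument]", by simp [pvIndicatorsA], hinf⟩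
    · exact ⟨"[karl story]", by simp [pvIndicatorsA], hinf⟩
    · exact ⟨"quelle:", by simp [pvIndicatorsA], hinf⟩
    · exact ⟨"stand:", by simp [pvIndicatorsA], hinf⟩

-- ===== VERDICT (by name: the statement is the Claim_ definition above) =====
theorem has_citation_py_spec : Claim_equal_has_citation_py := by
  intro text _
  unfold Spec_has_citation_py has_citation_py has_citation_py_alt
  rw [Bool.eq_iff_iff, List.any_eq_true, pvReSearch_iff, ← pvInds_iff]
  simp only [PySem.Str.isIn_iff_infix]
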